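-- pv_equiv track=rewrite | github.com/EithanLlanos/Py-Prac-2.4.1.6-LAB-LedDisplay | main.py | ledfun
-- ===== SOURCE A (Python) =====
-- def ledfun(nmbr,dit):
--     if not nmbr.isdigit():
--         return "El número que ha ingresado no es válido"
--
--     str=""
--     for i in range(5):
--         for c in nmbr:
--             str+=dit[c][i] + " "
--         str+="\n"
--     return str
-- ===== SOURCE B (Python) =====
-- def ledfun(nmbr, dit):
--     if not nmbr.isdigit():
--         return "El número que ha ingresado no es válido"
--     # single left-to-right pass over the digits: keep five growing row strings
--     # and append each digit's glyph horizontally as it is consumed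
--     rows = [""] * 5
--     for c in nmbr:
--         glyph = dit[c]
--         rows = [r + g + " " for r, g in zip(rows, glyph)]
--     return "".join(r + "\n" for r in rows)
-- ===== Notes on version B (the rewrite author's own statement) =====
-- stated objective: alternative
-- what changed: B replaces A's five row-major passes over the digit string (rows-outer, digits-inner, one flat accumulator string) by a single left-to-right pass over the digits that maintains five growing row strings and appends each digit's glyph horizontally via zip, joining the rows with newlines at the end.
import Mathlib
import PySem

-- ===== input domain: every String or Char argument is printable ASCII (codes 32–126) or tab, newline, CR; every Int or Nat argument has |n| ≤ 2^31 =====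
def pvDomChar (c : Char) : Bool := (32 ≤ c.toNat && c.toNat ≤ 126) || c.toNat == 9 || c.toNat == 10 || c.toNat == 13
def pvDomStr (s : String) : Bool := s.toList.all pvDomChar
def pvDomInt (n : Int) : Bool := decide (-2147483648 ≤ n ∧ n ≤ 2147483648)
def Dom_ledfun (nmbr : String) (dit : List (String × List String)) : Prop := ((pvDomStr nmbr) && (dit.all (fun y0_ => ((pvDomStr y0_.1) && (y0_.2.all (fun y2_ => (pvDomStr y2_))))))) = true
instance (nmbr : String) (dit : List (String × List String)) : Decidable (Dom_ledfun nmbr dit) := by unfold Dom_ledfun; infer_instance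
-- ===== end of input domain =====

-- B makes one pass over the digits, growing five row strings (horizontal glyph concatenation),
-- instead of A's five row-major passes with a flat accumulator (objective: alternative, same cost).

-- dit[c] — dict lookup by the one-character string c. Outside Pre_ Python raises (KeyError);
-- the default here is never what is claimed.
def pvGlyph (dit : List (String × List String)) (c : Char) : List String :=
  ((PySem.Dict.mk dit).get? (String.singleton c)).getD []

-- dit[c][i] as used by A (0 ≤ i < 5); default outside Pre_ only.
def pvCell (dit : List (String × List String)) (c : Char) (i : Nat) : String :=
  (pvGlyph dit c).getD i ""

-- ===== PORT A =====
def ledfun (nmbr : String) (dit : List (String × List String)) : String :=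
  if PySem.Str.strIsdigit nmbr = false then
    "El número que ha ingresado no es válido"
  else
    (List.range 5).foldl (fun s i =>
      (nmbr.toList.foldl (fun s c => s ++ (pvCell dit c i ++ " ")) s) ++ "\n") ""

-- ===== PORT B =====
def ledfun_alt (nmbr : String) (dit : List (String × List String)) : String :=
  if PySem.Str.strIsdigit nmbr = false then
    "El número que ha ingresado no es válido"
  else
    let rows := nmbr.toList.foldl
      (fun rows c => List.zipWith (fun r g => r ++ g ++ " ") rows (pvGlyph dit c))
      (List.replicate 5 "")
    PySem.Str.join "" (rows.map (fun r => r ++ "\n"))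

-- ===== PRECONDITION & SPEC =====
-- Pre_ excludes exactly the inputs where Python A raises: a digit of nmbr that is not a key of
-- dit (KeyError, B raises it too) or whose glyph list has fewer than 5 entries (IndexError).
def Pre_ledfun (nmbr : String) (dit : List (String × List String)) : Prop :=
  (!PySem.Str.strIsdigit nmbr
    || nmbr.toList.all (fun c => 5 ≤ (pvGlyph dit c).length)) = true

instance (nmbr : String) (dit : List (String × List String)) : Decidable (Pre_ledfun nmbr dit) := by
  unfold Pre_ledfun; infer_instance

def pvWitness_ledfun : String × (List (String × List String)) :=
  ("120", [("0", ["---", "| |", "| |", "| |", "---"]),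
           ("1", ["  |", "  |", "  |", "  |", "  |"]),
           ("2", ["---", "  |", "---", "|  ", "---"])])

def Spec_ledfun (nmbr : String) (dit : List (String × List String)) (out : String) : Prop := out = ledfun_alt nmbr dit
instance (nmbr : String) (dit : List (String × List String)) (out : String) : Decidable (Spec_ledfun nmbr dit out) := by unfold Spec_ledfun; infer_instance

-- ===== CLAIM (what is proved, stated in full; the proofs are below) =====
def Claim_equal_ledfun : Prop := ∀ (nmbr : String) (dit : List (String × List String)), Dom_ledfun nmbr dit → Pre_ledfun nmbr dit → Spec_ledfun nmbr dit (ledfun nmbr dit)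

-- ===== LEMMAS AND PROOFS =====

lemma pv_join_cons (x : String) (xs : List String) :
    PySem.Str.join "" (x :: xs) = x ++ PySem.Str.join "" xs := by
  cases xs with
  | nil => simp [PySem.Str.join, PySem.Chars.join, List.intercalate]
  | cons y ys => simp [PySem.Str.join, PySem.Chars.join_cons_cons]

lemma pv_foldl_join {α : Type} (l : List α) (g : α → String) (s : String) :
    l.foldl (fun s x => s ++ g x) s = s ++ PySem.Str.join "" (l.map g) := by
  induction l generalizing s with
  | nil => simp [PySem.Str.join, PySem.Chars.join, List.intercalate]
  | cons c t ih =>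
    simp only [List.foldl_cons, List.map_cons, ih, pv_join_cons, String.append_assoc]

-- one zipWith step on five rows written as a map over range 5
lemma pv_zip_step (f : Nat → String) (gl : List String) (hgl : 5 ≤ gl.length) :
    List.zipWith (fun r g => r ++ g ++ " ") ((List.range 5).map f) gl
      = (List.range 5).map (fun i => f i ++ gl.getD i "" ++ " ") := by
  apply List.ext_getElem
  · simp [Nat.min_eq_left hgl]
  · intro i h1 h2
    have hi : i < 5 := by simpa using h2
    simp [List.getD, List.getElem?_eq_getElem (by omega : i < gl.length)]

-- B's single pass over the digits, started from five rows given by f, computes for each row i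
-- exactly A's inner (digits) fold for that row started at f i
lemma pv_fold_rows (dit : List (String × List String)) (l : List Char)
    (hl : ∀ c ∈ l, 5 ≤ (pvGlyph dit c).length) (f : Nat → String) :
    l.foldl (fun rows c => List.zipWith (fun r g => r ++ g ++ " ") rows (pvGlyph dit c))
        ((List.range 5).map f)
      = (List.range 5).map (fun i => l.foldl (fun s c => s ++ (pvCell dit c i ++ " ")) (f i)) := by
  induction l generalizing f with
  | nil => rfl
  | cons c t ih =>
    simp only [List.foldl_cons]
    rw [pv_zip_step f (pvGlyph dit c) (hl c (by simp)),
        ih (fun x hx => hl x (by simp [hx])) (fun i => f i ++ (pvGlyph dit c).getD i "" ++ " ")]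
    apply List.map_congr_left
    intro i _
    congr 1
    simp [pvCell, String.append_assoc]

-- ===== VERDICT (by name: the statement is the Claim_ definition above) =====
-- A's outer (rows) fold, closed form: each row is the joined glyph cells plus a newline
lemma pv_outerA (dit : List (String × List String)) (l : List Char) (rs : List Nat) (s : String) :
    rs.foldl (fun s i => (l.foldl (fun s c => s ++ (pvCell dit c i ++ " ")) s) ++ "\n") s
      = s ++ PySem.Str.join ""
          (rs.map (fun i => PySem.Str.join "" (l.map (fun c => pvCell dit c i ++ " ")) ++ "\n")) := by
  induction rs generalizing s with
  | nil => simp [PySem.Str.join, PySem.Chars.join, List.intercalate]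
  | cons i t ih =>
    simp only [List.foldl_cons, List.map_cons, pv_join_cons, pv_foldl_join,
      String.append_assoc]

theorem ledfun_spec : Claim_equal_ledfun := by
  intro nmbr dit _ hpre
  unfold Spec_ledfun ledfun ledfun_alt
  cases hd : PySem.Str.strIsdigit nmbr with
  | false => simp
  | true =>
    rw [if_neg (by simp), if_neg (by simp)]
    have hl : ∀ c ∈ nmbr.toList, 5 ≤ (pvGlyph dit c).length := by
      unfold Pre_ledfun at hpre
      rw [hd] at hpre
      simpa using hpre
    show _ = PySem.Str.join "" ((nmbr.toList.foldl
        (fun rows c => List.zipWith (fun r g => r ++ g ++ " ") rows (pvGlyph dit c))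
        (List.replicate 5 "")).map (fun r => r ++ "\n"))
    rw [show (List.replicate 5 "") = (List.range 5).map (fun _ => "") by rfl,
        pv_fold_rows dit nmbr.toList hl (fun _ => ""), pv_outerA, List.map_map]
    simp [pv_foldl_join, Function.comp_def]
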